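-- pv_equiv track=rewrite | github.com/phungthanhloan1996/ai-recon-agent | ai/gap_analyzer.py | _collect_missing
-- ===== SOURCE A (Python) =====
-- from typing import Any, Dict, List, Optional, Set
--
-- _FILL_PRIORITY = [
--     "authenticated_session", "authentication_required", "login_required",
--     "admin_access", "valid_credentials",
--     "version_info", "plugin_version", "wordpress_version",
--     "xmlrpc_enabled", "xmlrpc_available",
--     "api_endpoint", "rest_api", "graphql_endpoint",
--     "swagger_available", "openapi_spec",
--     "file_upload_available", "upload_endpoint", "upload_capability",
--     "admin_panel", "admin_accessible", "hidden_path",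
--     "parameter_available", "injectable_param",
--     "endpoint_discovery",
-- ]
--
-- def _collect_missing(
--     chains: List[Dict], fulfilled: Set[str]
-- ) -> List[str]:
--     """Unique missing conditions across all chains, not yet fulfilled."""
--     seen: Set[str] = set()
--     ordered: List[str] = []
--     for chain in chains:
--         for cond in (chain.get("preconditions_missing") or []):
--             key = cond.lower()
--             if key not in seen and key not in fulfilled:
--                 seen.add(key)
--                 ordered.append(key)
--     # Sort by known priority order (auth before upload, etc.)
--     def _prio(c):
--         try:
--             return _FILL_PRIORITY.index(c)
--         except ValueError:
--             return len(_FILL_PRIORITY)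
--     return sorted(ordered, key=_prio)
-- ===== SOURCE B (Python) =====
-- _FILL_PRIORITY = [
--     "authenticated_session", "authentication_required", "login_required",
--     "admin_access", "valid_credentials",
--     "version_info", "plugin_version", "wordpress_version",
--     "xmlrpc_enabled", "xmlrpc_available",
--     "api_endpoint", "rest_api", "graphql_endpoint",
--     "swagger_available", "openapi_spec",
--     "file_upload_available", "upload_endpoint", "upload_capability",
--     "admin_panel", "admin_accessible", "hidden_path",
--     "parameter_available", "injectable_param",
--     "endpoint_discovery",
-- ]
--
-- def _collect_missing(chains, fulfilled):
--     """Same result as the sort-by-priority-index version, without sorting: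
--     walk the fixed priority table once, then append the unknown conditions
--     in first-seen order."""
--     lowered = [cond.lower() for chain in chains
--                for cond in (chain.get("preconditions_missing") or [])]
--     collected = list(dict.fromkeys(k for k in lowered if k not in fulfilled))
--     known = [p for p in _FILL_PRIORITY if p in collected]
--     rest = [c for c in collected if c not in _FILL_PRIORITY]
--     return known + rest
-- ===== Notes on version B (the rewrite author's own statement) =====
-- stated objective: alternative
-- what changed: B replaces A's stable sort by priority index (with list.index inside the key function) by a single pass over the fixed _FILL_PRIORITY table followed by the remaining collected conditions in first-seen order, and builds the deduplicated collected list with dict.fromkeys over a flattened comprehension instead of A's nested loops with a seen-set.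
import Mathlib
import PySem

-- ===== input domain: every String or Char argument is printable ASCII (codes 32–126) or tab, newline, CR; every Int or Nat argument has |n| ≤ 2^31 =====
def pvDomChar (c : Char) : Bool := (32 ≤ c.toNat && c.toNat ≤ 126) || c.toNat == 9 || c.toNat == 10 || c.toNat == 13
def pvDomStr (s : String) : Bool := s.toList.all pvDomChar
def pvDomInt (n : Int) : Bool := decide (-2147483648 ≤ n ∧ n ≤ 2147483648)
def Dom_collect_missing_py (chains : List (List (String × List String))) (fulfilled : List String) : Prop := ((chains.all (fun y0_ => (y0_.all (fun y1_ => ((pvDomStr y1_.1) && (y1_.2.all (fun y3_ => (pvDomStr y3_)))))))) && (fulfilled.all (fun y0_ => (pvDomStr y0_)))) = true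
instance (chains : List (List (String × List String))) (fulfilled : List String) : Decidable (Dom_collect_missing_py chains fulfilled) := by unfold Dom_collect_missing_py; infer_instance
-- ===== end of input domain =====

-- B replaces A's sort-by-priority-index with a single pass over the fixed priority
-- table followed by the unknown conditions in first-seen order (objective: alternative).

-- ===== PORT A =====
def fillPriority : List String := [
  "authenticated_session", "authentication_required", "login_required",
  "admin_access", "valid_credentials",
  "version_info", "plugin_version", "wordpress_version",
  "xmlrpc_enabled", "xmlrpc_available",
  "api_endpoint", "rest_api", "graphql_endpoint",
  "swagger_available", "openapi_spec",
  "file_upload_available", "upload_endpoint", "upload_capability",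
  "admin_panel", "admin_accessible", "hidden_path",
  "parameter_available", "injectable_param",
  "endpoint_discovery"]

-- _prio: try/except around list.index, ValueError → len(_FILL_PRIORITY)
def prioA (c : String) : Nat :=
  match PySem.List.index? fillPriority c with
  | some i => i
  | none => fillPriority.length

def collect_missing_py (chains : List (List (String × List String))) (fulfilled : List String) : List String :=
  let st := chains.foldl
    (fun (st : PySem.Set String × List String) chain =>
      ((PySem.Dict.get? (PySem.Dict.mk chain) "preconditions_missing").getD []).foldl
        (fun st cond =>
          let key := PySem.Str.lower cond
          if !(PySem.Set.contains st.1 key) && !(PySem.Set.contains fulfilled key) then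
            (PySem.Set.add st.1 key, st.2 ++ [key])
          else st)
        st)
    (PySem.Set.empty, [])
  PySem.List.sorted st.2 prioA

-- ===== PORT B =====
def collect_missing_py_alt (chains : List (List (String × List String))) (fulfilled : List String) : List String :=
  let lowered := (chains.flatMap
    (fun chain => (PySem.Dict.get? (PySem.Dict.mk chain) "preconditions_missing").getD [])).map PySem.Str.lower
  let collected := PySem.List.dedup (lowered.filter (fun k => !(PySem.Set.contains fulfilled k)))
  fillPriority.filter (fun p => collected.contains p)
    ++ collected.filter (fun c => !(fillPriority.contains c))

-- ===== PRECONDITION & SPEC =====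
def Spec_collect_missing_py (chains : List (List (String × List String))) (fulfilled : List String) (out : List String) : Prop := out = collect_missing_py_alt chains fulfilled
instance (chains : List (List (String × List String))) (fulfilled : List String) (out : List String) : Decidable (Spec_collect_missing_py chains fulfilled out) := by unfold Spec_collect_missing_py; infer_instance

-- ===== CLAIM (what is proved, stated in full; the proofs are below) =====
def Claim_equal_collect_missing_py : Prop := ∀ (chains : List (List (String × List String))) (fulfilled : List String), Dom_collect_missing_py chains fulfilled → Spec_collect_missing_py chains fulfilled (collect_missing_py chains fulfilled)

-- ===== LEMMAS AND PROOFS =====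

-- the list-only form of A's accumulation step
def stepL (fulfilled : List String) (l : List String) (cond : String) : List String :=
  let key := PySem.Str.lower cond
  if !(l.contains key) && !(fulfilled.contains key) then l ++ [key] else l

-- A's nested loop over chains = one loop over the flattened condition list
theorem foldl_flatMap_eq {α β γ : Type} (g : α → List β) (f : γ → β → γ) :
    ∀ (l : List α) (init : γ),
      l.foldl (fun acc a => (g a).foldl f acc) init = (l.flatMap g).foldl f init := by
  intro l
  induction l with
  | nil => intro init; rfl
  | cons a t ih => intro init; simp [List.foldl_append, ih]

-- A's pair state keeps seen = ordered
theorem pair_fold_eq (fulfilled : List String) :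
    ∀ (cs : List String) (l : List String),
      cs.foldl
        (fun (st : PySem.Set String × List String) cond =>
          let key := PySem.Str.lower cond
          if !(PySem.Set.contains st.1 key) && !(PySem.Set.contains fulfilled key) then
            (PySem.Set.add st.1 key, st.2 ++ [key])
          else st)
        (l, l)
      = (cs.foldl (stepL fulfilled) l, cs.foldl (stepL fulfilled) l) := by
  intro cs
  induction cs with
  | nil => intro l; rfl
  | cons c t ih =>
    intro l
    have hstep : (if !(PySem.Set.contains l (PySem.Str.lower c)) && !(PySem.Set.contains fulfilled (PySem.Str.lower c)) then (PySem.Set.add l (PySem.Str.lower c), l ++ [PySem.Str.lower c]) else (l, l)) = (stepL fulfilled l c, stepL fulfilled l c) := by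
      by_cases h1 : PySem.Str.lower c ∈ l
      · simp [PySem.Set.contains, stepL, h1]
      · by_cases h2 : PySem.Str.lower c ∈ fulfilled
        · simp [PySem.Set.contains, stepL, h1, h2]
        · simp [PySem.Set.contains, PySem.Set.add, stepL, h1, h2]
    simp only [List.foldl_cons]
    have h' := ih (stepL fulfilled l c)
    rw [← hstep] at h'
    exact h'

-- B's dedup-of-filter-of-map is the same left fold
theorem collected_eq_fold (fulfilled : List String) (ys : List String) :
    PySem.List.dedup ((ys.map PySem.Str.lower).filter (fun k => !(PySem.Set.contains fulfilled k)))
      = ys.foldl (stepL fulfilled) [] := by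
  rw [PySem.List.dedup_eq_ofList, PySem.Set.ofList_eq_foldl, List.foldl_filter, List.foldl_map]
  apply List.foldl_ext
  intro l c _
  simp only [stepL, PySem.Set.contains, PySem.Set.add, List.contains_iff_mem]
  by_cases h1 : PySem.Str.lower c ∈ l <;> by_cases h2 : PySem.Str.lower c ∈ fulfilled <;>
    simp [h1, h2]

theorem prioA_some {a : String} {i : Nat} (h : PySem.List.index? fillPriority a = some i) :
    prioA a = i := by unfold prioA; rw [h]

theorem prioA_none {a : String} (h : a ∉ fillPriority) : prioA a = fillPriority.length := by
  unfold prioA; rw [(PySem.List.index?_eq_none_iff _ _).2 h]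

-- the priority key is at most the table length
theorem prioA_le (a : String) : prioA a ≤ fillPriority.length := by
  cases h : PySem.List.index? fillPriority a with
  | none =>
    rw [prioA_none (by rwa [← PySem.List.index?_eq_none_iff fillPriority a])]
  | some i =>
    obtain ⟨pre, suf, hd, hl, _⟩ := (PySem.List.index?_eq_some_iff _ _ _).1 h
    have hlen : fillPriority.length = pre.length + 1 + suf.length := by
      rw [hd]; simp; omega
    rw [prioA_some h]; omega

-- insertBy places x between a false-prefix and a true-suffix
theorem insertBy_split (before : String → String → Bool) (x : String) :
    ∀ (u v : List String), (∀ a ∈ u, before x a = false) → (∀ b ∈ v, before x b = true) →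
      PySem.List.insertBy before x (u ++ v) = u ++ x :: v := by
  intro u
  induction u with
  | nil =>
    intro v _ hv
    cases v with
    | nil => rfl
    | cons b t => simp [PySem.List.insertBy, hv b (by simp)]
  | cons a u ih =>
    intro v hu hv
    have ha : before x a = false := hu a (by simp)
    simp [PySem.List.insertBy, ha, ih v (fun a ha => hu a (by simp [ha])) hv]

-- the priority-table pass followed by the unknowns, as a function of the collected prefix
def pstate (l : List String) : List String :=
  fillPriority.filter (fun p => l.contains p) ++ l.filter (fun c => !(fillPriority.contains c))

theorem contains_append_single_ne (l : List String) {a x : String} (h : a ≠ x) :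
    ((l ++ [x]).contains a) = l.contains a := by
  simp [h]

theorem ins_step (x : String) (l : List String) (hx : x ∉ l) :
    PySem.List.insertBy (fun a b => decide (prioA a < prioA b)) x (pstate l)
      = pstate (l ++ [x]) := by
  by_cases hxP : x ∈ fillPriority
  · -- x is a known priority: split the table at x's first occurrence
    obtain ⟨i, hi⟩ : ∃ i, PySem.List.index? fillPriority x = some i :=
      Option.isSome_iff_exists.1 ((PySem.List.index?_isSome_iff fillPriority x).2 hxP)
    obtain ⟨pre, suf, hd, hlen, hxpre⟩ := (PySem.List.index?_eq_some_iff _ _ _).1 hi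
    have hprioX : prioA x = i := prioA_some hi
    have hN : fillPriority.Nodup := by decide
    have hNd : (pre ++ x :: suf).Nodup := hd ▸ hN
    rw [List.nodup_append] at hNd
    have hxsuf : x ∉ suf := by
      have := hNd.2.1
      rw [List.nodup_cons] at this
      exact this.1
    have hdisj : ∀ b ∈ suf, b ∉ pre := fun b hb hbp => (hNd.2.2 b hbp b (by simp [hb])) rfl
    -- key bounds
    have hpre_lt : ∀ a ∈ pre, prioA a < i := by
      intro a ha
      have h1 : PySem.List.index? fillPriority a = PySem.List.index? pre a := by
        rw [hd]; exact PySem.List.index?_append_of_mem _ ha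
      obtain ⟨j, hj⟩ : ∃ j, PySem.List.index? pre a = some j :=
        Option.isSome_iff_exists.1 ((PySem.List.index?_isSome_iff pre a).2 ha)
      obtain ⟨q, r, hqd, hql, _⟩ := (PySem.List.index?_eq_some_iff _ _ _).1 hj
      have hql2 : pre.length = q.length + 1 + r.length := by rw [hqd]; simp; omega
      rw [prioA_some (h1.trans hj)]; omega
    have hsuf_gt : ∀ b ∈ suf, i < prioA b := by
      intro b hb
      obtain ⟨j, hj⟩ : ∃ j, PySem.List.index? fillPriority b = some j :=
        Option.isSome_iff_exists.1
          ((PySem.List.index?_isSome_iff fillPriority b).2 (by rw [hd]; simp [hb]))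
      obtain ⟨hk, hgb, _⟩ := PySem.List.getElem_of_index?_eq_some hj
      have hne : b ≠ x := fun h => hxsuf (h ▸ hb)
      have hnp : b ∉ pre := hdisj b hb
      have hji : i < j := by
        by_contra hle
        rw [not_lt] at hle
        rcases Nat.lt_or_ge j i with hlt | hge
        · -- j < i = pre.length: fillPriority[j] ∈ pre
          have hjp : j < pre.length := by omega
          have hmem : fillPriority[j] ∈ pre := by
            rw [List.getElem_of_eq hd hk, List.getElem_append_left hjp]
            exact List.getElem_mem _
          exact hnp (hgb ▸ hmem)
        · -- j = i: fillPriority[j] = x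
          have hji' : j = pre.length := by omega
          have hgx : fillPriority[j] = x := by
            rw [List.getElem_of_eq hd hk]
            simp [hji']
          exact hne (hgb.symm.trans hgx)
      rw [prioA_some hj]; omega
    -- split pstate l at x's slot in the table
    have hsplit : pstate l
        = pre.filter (fun p => l.contains p)
          ++ (suf.filter (fun p => l.contains p)
              ++ l.filter (fun c => !((pre ++ x :: suf).contains c))) := by
      unfold pstate
      rw [hd, List.filter_append, List.filter_cons]
      simp
      exact hx
    rw [hsplit, insertBy_split]
    · unfold pstate
      rw [hd]
      have hpre : pre.filter (fun p => (l ++ [x]).contains p) = pre.filter (fun p => l.contains p) :=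
        List.filter_congr (fun a ha => contains_append_single_ne l (fun h => hxpre (h ▸ ha)))
      have hsuf' : suf.filter (fun p => (l ++ [x]).contains p) = suf.filter (fun p => l.contains p) :=
        List.filter_congr (fun b hb => contains_append_single_ne l (fun h => hxsuf (h ▸ hb)))
      have hg : (l ++ [x]).filter (fun c => !((pre ++ x :: suf).contains c))
          = l.filter (fun c => !((pre ++ x :: suf).contains c)) := by
        rw [List.filter_append]
        simp
      rw [List.filter_append, List.filter_cons, hpre, hsuf', hg]
      simp
    · intro a ha
      have ha' : a ∈ pre := List.mem_of_mem_filter ha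
      simp only [decide_eq_false_iff_not, not_lt, hprioX]
      exact le_of_lt (hpre_lt a ha')
    · intro b hb
      simp only [List.mem_append] at hb
      rcases hb with hb | hb
      · have hb' : b ∈ suf := List.mem_of_mem_filter hb
        simp only [decide_eq_true_eq, hprioX]
        exact hsuf_gt b hb'
      · have hb' : b ∉ fillPriority := by
          have := List.of_mem_filter hb
          rw [hd]
          simpa [List.contains_iff_mem] using this
        have hpb : prioA b = fillPriority.length := prioA_none hb'
        have hi_lt : i < fillPriority.length := by
          have : fillPriority.length = pre.length + 1 + suf.length := by rw [hd]; simp; omega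
          omega
        simp only [decide_eq_true_eq, hprioX, hpb]
        omega
  · -- x unknown to the table: it goes to the very end
    have hprioX : prioA x = fillPriority.length := prioA_none hxP
    rw [show pstate l = pstate l ++ [] from (List.append_nil _).symm,
        insertBy_split _ _ (pstate l) []]
    · unfold pstate
      have h1 : fillPriority.filter (fun p => (l ++ [x]).contains p)
          = fillPriority.filter (fun p => l.contains p) :=
        List.filter_congr (fun a ha => contains_append_single_ne l (fun h => hxP (h ▸ ha)))
      have h2 : (l ++ [x]).filter (fun c => !(fillPriority.contains c))
          = l.filter (fun c => !(fillPriority.contains c)) ++ [x] := by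
        rw [List.filter_append]
        simp
        exact hxP
      rw [h1, h2]
      simp
    · intro a _
      simp only [decide_eq_false_iff_not, not_lt, hprioX]
      exact prioA_le a
    · intro b hb
      exact absurd hb (List.not_mem_nil)

theorem sort_fold (xs : List String) : ∀ (l : List String), xs.Nodup → (∀ y ∈ xs, y ∉ l) →
    xs.foldl (fun acc x => PySem.List.insertBy (fun a b => decide (prioA a < prioA b)) x acc) (pstate l)
      = pstate (l ++ xs) := by
  induction xs with
  | nil => intro l _ _; simp
  | cons x t ih =>
    intro l hnd hdisj
    simp only [List.foldl_cons]
    rw [ins_step x l (hdisj x (by simp))]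
    rw [ih (l ++ [x]) (List.Nodup.of_cons hnd)]
    · simp
    · intro y hy
      simp only [List.mem_append, List.mem_singleton]
      rintro (h | rfl)
      · exact hdisj y (by simp [hy]) h
      · exact (List.nodup_cons.1 hnd).1 hy

-- ===== VERDICT (by name: the statement is the Claim_ definition above) =====
theorem collect_missing_py_spec : Claim_equal_collect_missing_py := by
  intro chains fulfilled _
  unfold Spec_collect_missing_py collect_missing_py collect_missing_py_alt
  simp only []
  rw [foldl_flatMap_eq]
  have hpair := pair_fold_eq fulfilled
    ((chains.flatMap (fun chain => (PySem.Dict.get? (PySem.Dict.mk chain) "preconditions_missing").getD [])))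
    []
  rw [show (PySem.Set.empty : PySem.Set String) = ([] : List String) from rfl] at *
  rw [hpair]
  set cs := (chains.flatMap (fun chain => (PySem.Dict.get? (PySem.Dict.mk chain) "preconditions_missing").getD []))
  have hcol := collected_eq_fold fulfilled cs
  rw [← hcol]
  set collected := PySem.List.dedup ((cs.map PySem.Str.lower).filter (fun k => !(PySem.Set.contains fulfilled k))) with hc
  have hnd : collected.Nodup := PySem.List.nodup_dedup _
  rw [PySem.List.sorted_eq_foldl_insertBy]
  have h0 : ([] : List String) = pstate [] := by unfold pstate; simp
  rw [h0, sort_fold collected [] hnd (by intro y _ h; exact absurd h (List.not_mem_nil))]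
  unfold pstate
  simp
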